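-- pv_equiv track=rewrite | github.com/ellermw/TowerView | backend/app/services/analytics_service.py | normalize_client_name
-- ===== SOURCE A (Python) =====
-- def normalize_client_name(product: str) -> str:
--     """Normalize client/product names to combine similar variants"""
--     if not product:
--         return "Unknown Client"
--
--     product_lower = product.lower().strip()
--
--     # Plex clients
--     if "plex" in product_lower:
--         if "android" in product_lower and "tv" in product_lower:
--             return "Plex for Android TV"
--         elif "android" in product_lower:
--             return "Plex for Android"
--         elif "apple tv" in product_lower or "appletv" in product_lower or "tvos" in product_lower:
--             return "Plex for Apple TV"
--         elif "roku" in product_lower: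
--             return "Plex for Roku"
--         elif "ios" in product_lower or "iphone" in product_lower:
--             return "Plex for iOS"
--         elif "web" in product_lower or "chrome" in product_lower or "firefox" in product_lower or "safari" in product_lower:
--             return "Plex Web"
--         elif "xbox" in product_lower:
--             return "Plex for Xbox"
--         elif "playstation" in product_lower or "ps4" in product_lower or "ps5" in product_lower:
--             return "Plex for PlayStation"
--         else:
--             return "Plex"
--
--     # Emby clients
--     if "emby" in product_lower:
--         if "apple tv" in product_lower or "appletv" in product_lower:
--             return "Emby for Apple TV"
--         elif "android" in product_lower and "tv" in product_lower:
--             return "Emby for Android TV"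
--         elif "android" in product_lower:
--             return "Emby for Android"
--         elif "roku" in product_lower:
--             return "Emby for Roku"
--         elif "ios" in product_lower:
--             return "Emby for iOS"
--         elif "web" in product_lower:
--             return "Emby Web"
--         else:
--             return "Emby"
--
--     # Jellyfin clients
--     if "jellyfin" in product_lower:
--         if "roku" in product_lower:
--             return "Jellyfin for Roku"
--         elif "android" in product_lower and "tv" in product_lower:
--             return "Jellyfin for Android TV"
--         elif "android" in product_lower:
--             return "Jellyfin for Android"
--         elif "apple tv" in product_lower or "appletv" in product_lower or "tvos" in product_lower:
--             return "Jellyfin for Apple TV"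
--         elif "ios" in product_lower:
--             return "Jellyfin for iOS"
--         elif "media player" in product_lower:
--             return "Jellyfin Media Player"
--         elif "web" in product_lower:
--             return "Jellyfin Web"
--         else:
--             return "Jellyfin"
--
--     # Third-party clients
--     if "infuse" in product_lower:
--         return "Infuse"
--     if "vidhub" in product_lower:
--         return "VidHub"
--     if "senplayer" in product_lower:
--         return "SenPlayer"
--     if "mrmc" in product_lower:
--         return "MrMC"
--     if "kodi" in product_lower:
--         return "Kodi"
--
--     # Android TV variants (standalone)
--     if ("androidtv" in product_lower.replace(" ", "") or
--         "android tv" in product_lower or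
--         "android_tv" in product_lower):
--         return "Android TV"
--
--     # Roku variants (standalone)
--     if "roku" in product_lower:
--         return "Roku"
--
--     # Return original if no match found (capitalize first letter of each word)
--     return " ".join(word.capitalize() for word in product.split())
-- ===== SOURCE B (Python) =====
-- # Compositional re-implementation: detect brand and platform separately with a
-- # shared (brand-parametrized) platform predicate, then SYNTHESIZE the label by
-- # string concatenation instead of enumerating whole labels in an if/elif chain.
--
-- _ORDERS = {
--     "plex": ["Android TV", "Android", "Apple TV", "Roku", "iOS", "Web",
--              "Xbox", "PlayStation"],
--     "emby": ["Apple TV", "Android TV", "Android", "Roku", "iOS", "Web"],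
--     "jellyfin": ["Roku", "Android TV", "Android", "Apple TV", "iOS",
--                  "Media Player", "Web"],
-- }
--
--
-- def _has_platform(s, brand, name):
--     if name == "Android TV":
--         return "android" in s and "tv" in s
--     if name == "Apple TV":
--         return "apple tv" in s or "appletv" in s or (brand != "emby" and "tvos" in s)
--     if name == "iOS":
--         return "ios" in s or (brand == "plex" and "iphone" in s)
--     if name == "Web":
--         return "web" in s or (brand == "plex" and
--                               ("chrome" in s or "firefox" in s or "safari" in s))
--     if name == "PlayStation":
--         return "playstation" in s or "ps4" in s or "ps5" in s
--     return name.lower() in s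
--
--
-- def _compose(brand, platform):
--     b = brand.capitalize()
--     if not platform:
--         return b
--     if platform in ("Web", "Media Player"):
--         return b + " " + platform
--     return b + " for " + platform
--
--
-- def normalize_client_name(product: str) -> str:
--     if not product:
--         return "Unknown Client"
--     s = product.lower().strip()
--     for brand in ("plex", "emby", "jellyfin"):
--         if brand in s:
--             platform = next((p for p in _ORDERS[brand]
--                              if _has_platform(s, brand, p)), "")
--             return _compose(brand, platform)
--     for kw, label in (("infuse", "Infuse"), ("vidhub", "VidHub"),
--                       ("senplayer", "SenPlayer"), ("mrmc", "MrMC"),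
--                       ("kodi", "Kodi")):
--         if kw in s:
--             return label
--     if ("androidtv" in s.replace(" ", "") or "android tv" in s
--             or "android_tv" in s):
--         return "Android TV"
--     if "roku" in s:
--         return "Roku"
--     return " ".join(w.capitalize() for w in product.split())
-- ===== Notes on version B (the rewrite author's own statement) =====
-- stated objective: alternative
-- what changed: Instead of an if/elif chain enumerating every whole label, B detects the brand and the platform separately (one shared brand-parametrized platform predicate plus a per-brand priority list) and synthesizes the label by concatenation ('Brand for Platform' / 'Brand Platform' / 'Brand'); third-party keywords and standalone checks stay as a short tail scan.
import Mathlib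
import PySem

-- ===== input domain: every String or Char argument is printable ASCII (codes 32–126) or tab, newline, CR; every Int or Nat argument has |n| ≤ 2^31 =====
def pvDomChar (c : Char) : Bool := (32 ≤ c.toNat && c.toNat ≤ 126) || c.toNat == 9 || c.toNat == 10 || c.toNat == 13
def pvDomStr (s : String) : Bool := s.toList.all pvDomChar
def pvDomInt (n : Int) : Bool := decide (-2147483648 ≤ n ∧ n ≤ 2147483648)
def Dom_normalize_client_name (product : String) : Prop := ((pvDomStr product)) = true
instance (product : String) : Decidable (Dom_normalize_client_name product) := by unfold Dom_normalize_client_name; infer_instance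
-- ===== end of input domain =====

-- B detects brand and platform separately (shared brand-parametrized platform predicate + per-brand
-- priority list) and synthesizes the label by concatenation; alternative decomposition, same cost.

-- word.capitalize(): first char upper, rest lower — exact on the ASCII domain
def capList : List Char → List Char
  | [] => []
  | c :: rest => PySem.Chars.upper [c] ++ PySem.Chars.lower rest
def pyCapitalize (w : String) : String := String.ofList (capList w.toList)

-- " ".join(word.capitalize() for word in product.split())
def ncFallback (product : String) : String :=
  PySem.Str.join " " ((PySem.Str.split₀ product).map pyCapitalize)

-- ===== PORT A =====
def normalize_client_name (product : String) : String :=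
  if product.toList = [] then "Unknown Client"
  else
    let s := PySem.Str.strip (PySem.Str.lower product)
    if PySem.Str.isIn "plex" s then
      if PySem.Str.isIn "android" s && PySem.Str.isIn "tv" s then "Plex for Android TV"
      else if PySem.Str.isIn "android" s then "Plex for Android"
      else if PySem.Str.isIn "apple tv" s || PySem.Str.isIn "appletv" s || PySem.Str.isIn "tvos" s then "Plex for Apple TV"
      else if PySem.Str.isIn "roku" s then "Plex for Roku"
      else if PySem.Str.isIn "ios" s || PySem.Str.isIn "iphone" s then "Plex for iOS"
      else if PySem.Str.isIn "web" s || PySem.Str.isIn "chrome" s || PySem.Str.isIn "firefox" s || PySem.Str.isIn "safari" s then "Plex Web"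
      else if PySem.Str.isIn "xbox" s then "Plex for Xbox"
      else if PySem.Str.isIn "playstation" s || PySem.Str.isIn "ps4" s || PySem.Str.isIn "ps5" s then "Plex for PlayStation"
      else "Plex"
    else if PySem.Str.isIn "emby" s then
      if PySem.Str.isIn "apple tv" s || PySem.Str.isIn "appletv" s then "Emby for Apple TV"
      else if PySem.Str.isIn "android" s && PySem.Str.isIn "tv" s then "Emby for Android TV"
      else if PySem.Str.isIn "android" s then "Emby for Android"
      else if PySem.Str.isIn "roku" s then "Emby for Roku"
      else if PySem.Str.isIn "ios" s then "Emby for iOS"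
      else if PySem.Str.isIn "web" s then "Emby Web"
      else "Emby"
    else if PySem.Str.isIn "jellyfin" s then
      if PySem.Str.isIn "roku" s then "Jellyfin for Roku"
      else if PySem.Str.isIn "android" s && PySem.Str.isIn "tv" s then "Jellyfin for Android TV"
      else if PySem.Str.isIn "android" s then "Jellyfin for Android"
      else if PySem.Str.isIn "apple tv" s || PySem.Str.isIn "appletv" s || PySem.Str.isIn "tvos" s then "Jellyfin for Apple TV"
      else if PySem.Str.isIn "ios" s then "Jellyfin for iOS"
      else if PySem.Str.isIn "media player" s then "Jellyfin Media Player"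
      else if PySem.Str.isIn "web" s then "Jellyfin Web"
      else "Jellyfin"
    else if PySem.Str.isIn "infuse" s then "Infuse"
    else if PySem.Str.isIn "vidhub" s then "VidHub"
    else if PySem.Str.isIn "senplayer" s then "SenPlayer"
    else if PySem.Str.isIn "mrmc" s then "MrMC"
    else if PySem.Str.isIn "kodi" s then "Kodi"
    else if PySem.Str.isIn "androidtv" (PySem.Str.replace s " " "") || PySem.Str.isIn "android tv" s || PySem.Str.isIn "android_tv" s then "Android TV"
    else if PySem.Str.isIn "roku" s then "Roku"
    else ncFallback product

-- ===== PORT B =====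
-- per-brand platform priority lists
def ncOrder (brand : String) : List String :=
  if brand = "plex" then ["Android TV", "Android", "Apple TV", "Roku", "iOS", "Web", "Xbox", "PlayStation"]
  else if brand = "emby" then ["Apple TV", "Android TV", "Android", "Roku", "iOS", "Web"]
  else ["Roku", "Android TV", "Android", "Apple TV", "iOS", "Media Player", "Web"]

-- shared, brand-parametrized platform predicate (_has_platform in Source B)
def ncHasPlatform (s brand name : String) : Bool :=
  if name = "Android TV" then PySem.Str.isIn "android" s && PySem.Str.isIn "tv" s
  else if name = "Apple TV" then
    PySem.Str.isIn "apple tv" s || PySem.Str.isIn "appletv" s ||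
      ((if brand = "emby" then false else true) && PySem.Str.isIn "tvos" s)
  else if name = "iOS" then
    PySem.Str.isIn "ios" s || ((if brand = "plex" then true else false) && PySem.Str.isIn "iphone" s)
  else if name = "Web" then
    PySem.Str.isIn "web" s || ((if brand = "plex" then true else false) &&
      (PySem.Str.isIn "chrome" s || PySem.Str.isIn "firefox" s || PySem.Str.isIn "safari" s))
  else if name = "PlayStation" then
    PySem.Str.isIn "playstation" s || PySem.Str.isIn "ps4" s || PySem.Str.isIn "ps5" s
  else PySem.Str.isIn (PySem.Str.lower name) s

-- next((p for p in order if _has_platform(s, brand, p)), "")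
def ncDetectPlatform (s brand : String) : List String → String
  | [] => ""
  | p :: rest => if ncHasPlatform s brand p then p else ncDetectPlatform s brand rest

-- label synthesis (_compose in Source B): "Brand" / "Brand Web" / "Brand Media Player" / "Brand for Platform"
def ncCompose (brand platform : String) : String :=
  let b := pyCapitalize brand
  if platform = "" then b
  else if platform = "Web" ∨ platform = "Media Player" then b ++ " " ++ platform
  else b ++ " for " ++ platform

-- the standalone Android TV / Roku checks after the keyword loop (fb = the capitalized fallback)
def ncTail (s fb : String) : String :=
  if PySem.Str.isIn "androidtv" (PySem.Str.replace s " " "") || PySem.Str.isIn "android tv" s || PySem.Str.isIn "android_tv" s then "Android TV"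
  else if PySem.Str.isIn "roku" s then "Roku"
  else fb

-- the third-party keyword loop: first (kw, label) with kw in s, else the tail checks
def ncKwLoop (s fb : String) : List (String × String) → String
  | [] => ncTail s fb
  | (kw, label) :: rest => if PySem.Str.isIn kw s then label else ncKwLoop s fb rest

-- the brand loop: first brand substring present decides; platform detection + label synthesis
def ncBrandLoop (s fb : String) : List String → String
  | [] => ncKwLoop s fb [("infuse", "Infuse"), ("vidhub", "VidHub"), ("senplayer", "SenPlayer"), ("mrmc", "MrMC"), ("kodi", "Kodi")]
  | b :: rest => if PySem.Str.isIn b s then ncCompose b (ncDetectPlatform s b (ncOrder b)) else ncBrandLoop s fb rest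

def normalize_client_name_alt (product : String) : String :=
  if product.toList = [] then "Unknown Client"
  else
    let s := PySem.Str.strip (PySem.Str.lower product)
    ncBrandLoop s (ncFallback product) ["plex", "emby", "jellyfin"]

-- ===== PRECONDITION & SPEC =====
def Spec_normalize_client_name (product : String) (out : String) : Prop := out = normalize_client_name_alt product
instance (product : String) (out : String) : Decidable (Spec_normalize_client_name product out) := by unfold Spec_normalize_client_name; infer_instance

-- ===== CLAIM (what is proved, stated in full; the proofs are below) =====
def Claim_equal_normalize_client_name : Prop := ∀ (product : String), Dom_normalize_client_name product → Spec_normalize_client_name product (normalize_client_name product)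

-- ===== LEMMAS AND PROOFS =====
theorem cap_plex : pyCapitalize "plex" = "Plex" := by
  apply String.ext
  simp [pyCapitalize, capList, PySem.Chars.upper, PySem.Chars.lower,
    PySem.Chars.upperChar, PySem.Chars.lowerChar, PySem.Chars.islower, PySem.Chars.isupper]
theorem cap_emby : pyCapitalize "emby" = "Emby" := by
  apply String.ext
  simp [pyCapitalize, capList, PySem.Chars.upper, PySem.Chars.lower,
    PySem.Chars.upperChar, PySem.Chars.lowerChar, PySem.Chars.islower, PySem.Chars.isupper]
theorem cap_jellyfin : pyCapitalize "jellyfin" = "Jellyfin" := by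
  apply String.ext
  simp [pyCapitalize, capList, PySem.Chars.upper, PySem.Chars.lower,
    PySem.Chars.upperChar, PySem.Chars.lowerChar, PySem.Chars.islower, PySem.Chars.isupper]
theorem nc_lower_android : PySem.Str.lower "Android" = "android" := by
  apply String.ext
  simp [PySem.Str.lower, PySem.Chars.lower, PySem.Chars.lowerChar, PySem.Chars.isupper]
theorem nc_lower_roku : PySem.Str.lower "Roku" = "roku" := by
  apply String.ext
  simp [PySem.Str.lower, PySem.Chars.lower, PySem.Chars.lowerChar, PySem.Chars.isupper]
theorem nc_lower_xbox : PySem.Str.lower "Xbox" = "xbox" := by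
  apply String.ext
  simp [PySem.Str.lower, PySem.Chars.lower, PySem.Chars.lowerChar, PySem.Chars.isupper]
theorem nc_lower_mp : PySem.Str.lower "Media Player" = "media player" := by
  apply String.ext
  simp [PySem.Str.lower, PySem.Chars.lower, PySem.Chars.lowerChar, PySem.Chars.isupper]
theorem nc_c_plex_AndroidTV : ncCompose "plex" "Android TV" = "Plex for Android TV" := by simp [ncCompose, cap_plex]
theorem nc_c_plex_Android : ncCompose "plex" "Android" = "Plex for Android" := by simp [ncCompose, cap_plex]
theorem nc_c_plex_AppleTV : ncCompose "plex" "Apple TV" = "Plex for Apple TV" := by simp [ncCompose, cap_plex]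
theorem nc_c_plex_Roku : ncCompose "plex" "Roku" = "Plex for Roku" := by simp [ncCompose, cap_plex]
theorem nc_c_plex_iOS : ncCompose "plex" "iOS" = "Plex for iOS" := by simp [ncCompose, cap_plex]
theorem nc_c_plex_Web : ncCompose "plex" "Web" = "Plex Web" := by simp [ncCompose, cap_plex]
theorem nc_c_plex_Xbox : ncCompose "plex" "Xbox" = "Plex for Xbox" := by simp [ncCompose, cap_plex]
theorem nc_c_plex_PlayStation : ncCompose "plex" "PlayStation" = "Plex for PlayStation" := by simp [ncCompose, cap_plex]
theorem nc_c_plex_none : ncCompose "plex" "" = "Plex" := by simp [ncCompose, cap_plex]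
theorem nc_c_emby_AppleTV : ncCompose "emby" "Apple TV" = "Emby for Apple TV" := by simp [ncCompose, cap_emby]
theorem nc_c_emby_AndroidTV : ncCompose "emby" "Android TV" = "Emby for Android TV" := by simp [ncCompose, cap_emby]
theorem nc_c_emby_Android : ncCompose "emby" "Android" = "Emby for Android" := by simp [ncCompose, cap_emby]
theorem nc_c_emby_Roku : ncCompose "emby" "Roku" = "Emby for Roku" := by simp [ncCompose, cap_emby]
theorem nc_c_emby_iOS : ncCompose "emby" "iOS" = "Emby for iOS" := by simp [ncCompose, cap_emby]
theorem nc_c_emby_Web : ncCompose "emby" "Web" = "Emby Web" := by simp [ncCompose, cap_emby]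
theorem nc_c_emby_none : ncCompose "emby" "" = "Emby" := by simp [ncCompose, cap_emby]
theorem nc_c_jellyfin_Roku : ncCompose "jellyfin" "Roku" = "Jellyfin for Roku" := by simp [ncCompose, cap_jellyfin]
theorem nc_c_jellyfin_AndroidTV : ncCompose "jellyfin" "Android TV" = "Jellyfin for Android TV" := by simp [ncCompose, cap_jellyfin]
theorem nc_c_jellyfin_Android : ncCompose "jellyfin" "Android" = "Jellyfin for Android" := by simp [ncCompose, cap_jellyfin]
theorem nc_c_jellyfin_AppleTV : ncCompose "jellyfin" "Apple TV" = "Jellyfin for Apple TV" := by simp [ncCompose, cap_jellyfin]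
theorem nc_c_jellyfin_iOS : ncCompose "jellyfin" "iOS" = "Jellyfin for iOS" := by simp [ncCompose, cap_jellyfin]
theorem nc_c_jellyfin_MediaPlayer : ncCompose "jellyfin" "Media Player" = "Jellyfin Media Player" := by simp [ncCompose, cap_jellyfin]
theorem nc_c_jellyfin_Web : ncCompose "jellyfin" "Web" = "Jellyfin Web" := by simp [ncCompose, cap_jellyfin]
theorem nc_c_jellyfin_none : ncCompose "jellyfin" "" = "Jellyfin" := by simp [ncCompose, cap_jellyfin]
theorem nc_plex_eval (s : String) :
  ncCompose "plex" (ncDetectPlatform s "plex" (ncOrder "plex")) =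
  (if PySem.Str.isIn "android" s && PySem.Str.isIn "tv" s then "Plex for Android TV"
   else if PySem.Str.isIn "android" s then "Plex for Android"
   else if PySem.Str.isIn "apple tv" s || PySem.Str.isIn "appletv" s || PySem.Str.isIn "tvos" s then "Plex for Apple TV"
   else if PySem.Str.isIn "roku" s then "Plex for Roku"
   else if PySem.Str.isIn "ios" s || PySem.Str.isIn "iphone" s then "Plex for iOS"
   else if PySem.Str.isIn "web" s || PySem.Str.isIn "chrome" s || PySem.Str.isIn "firefox" s || PySem.Str.isIn "safari" s then "Plex Web"
   else if PySem.Str.isIn "xbox" s then "Plex for Xbox"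
   else if PySem.Str.isIn "playstation" s || PySem.Str.isIn "ps4" s || PySem.Str.isIn "ps5" s then "Plex for PlayStation"
   else "Plex") := by
  simp only [ncOrder, ncDetectPlatform, ncHasPlatform, nc_lower_android, nc_lower_roku, nc_lower_xbox, nc_lower_mp, String.reduceEq, if_true, if_false, Bool.true_and, Bool.false_and, Bool.or_false, Bool.or_assoc, reduceIte]
  split_ifs
  all_goals simp only [nc_c_plex_AndroidTV, nc_c_plex_Android, nc_c_plex_AppleTV, nc_c_plex_Roku, nc_c_plex_iOS, nc_c_plex_Web, nc_c_plex_Xbox, nc_c_plex_PlayStation, nc_c_plex_none]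
theorem nc_emby_eval (s : String) :
  ncCompose "emby" (ncDetectPlatform s "emby" (ncOrder "emby")) =
  (if PySem.Str.isIn "apple tv" s || PySem.Str.isIn "appletv" s then "Emby for Apple TV"
   else if PySem.Str.isIn "android" s && PySem.Str.isIn "tv" s then "Emby for Android TV"
   else if PySem.Str.isIn "android" s then "Emby for Android"
   else if PySem.Str.isIn "roku" s then "Emby for Roku"
   else if PySem.Str.isIn "ios" s then "Emby for iOS"
   else if PySem.Str.isIn "web" s then "Emby Web"
   else "Emby") := by
  simp only [ncOrder, ncDetectPlatform, ncHasPlatform, nc_lower_android, nc_lower_roku, nc_lower_xbox, nc_lower_mp, String.reduceEq, if_true, if_false, Bool.true_and, Bool.false_and, Bool.or_false, Bool.or_assoc, reduceIte]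
  split_ifs
  all_goals simp only [nc_c_emby_AppleTV, nc_c_emby_AndroidTV, nc_c_emby_Android, nc_c_emby_Roku, nc_c_emby_iOS, nc_c_emby_Web, nc_c_emby_none]
theorem nc_jellyfin_eval (s : String) :
  ncCompose "jellyfin" (ncDetectPlatform s "jellyfin" (ncOrder "jellyfin")) =
  (if PySem.Str.isIn "roku" s then "Jellyfin for Roku"
   else if PySem.Str.isIn "android" s && PySem.Str.isIn "tv" s then "Jellyfin for Android TV"
   else if PySem.Str.isIn "android" s then "Jellyfin for Android"
   else if PySem.Str.isIn "apple tv" s || PySem.Str.isIn "appletv" s || PySem.Str.isIn "tvos" s then "Jellyfin for Apple TV"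
   else if PySem.Str.isIn "ios" s then "Jellyfin for iOS"
   else if PySem.Str.isIn "media player" s then "Jellyfin Media Player"
   else if PySem.Str.isIn "web" s then "Jellyfin Web"
   else "Jellyfin") := by
  simp only [ncOrder, ncDetectPlatform, ncHasPlatform, nc_lower_android, nc_lower_roku, nc_lower_xbox, nc_lower_mp, String.reduceEq, if_true, if_false, Bool.true_and, Bool.false_and, Bool.or_false, Bool.or_assoc, reduceIte]
  split_ifs
  all_goals simp only [nc_c_jellyfin_Roku, nc_c_jellyfin_AndroidTV, nc_c_jellyfin_Android, nc_c_jellyfin_AppleTV, nc_c_jellyfin_iOS, nc_c_jellyfin_MediaPlayer, nc_c_jellyfin_Web, nc_c_jellyfin_none]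

-- ===== VERDICT (by name: the statement is the Claim_ definition above) =====
set_option maxHeartbeats 1000000 in
theorem normalize_client_name_spec : Claim_equal_normalize_client_name := by
  intro product _
  unfold Spec_normalize_client_name normalize_client_name normalize_client_name_alt
  by_cases h : product.toList = []
  · simp [h]
  · simp only [h, if_false]
    generalize ncFallback product = f
    set s := PySem.Str.strip (PySem.Str.lower product) with hs
    simp only [ncBrandLoop, ncKwLoop, ncTail, nc_plex_eval, nc_emby_eval, nc_jellyfin_eval]
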